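-- pv_equiv track=rewrite | github.com/Manoflast3/RSA-Encrypter-Decrypter-and-Keygen | main.py | convertInttoString
-- ===== SOURCE A (Python) =====
-- def convertInttoString(integer):
-- 	tempstr = str(integer)
-- 	while (len(tempstr)%3!=0):
-- 		tempstr = "0" + tempstr
--
-- 	# TODO Finish conversion
-- 	templist = [tempstr[i:i+3] for i in range(0, len(tempstr), 3)]
-- 	result = [chr(int(templist[i])) for i in range(0, len(templist))]
-- 	fresult = ''.join(result)
-- 	return fresult
-- ===== SOURCE B (Python) =====
-- def convertInttoString(integer):
--     # Pure arithmetic: peel base-1000 digits off the integer recursively,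
--     # never touching its decimal-string form.
--     if integer < 1000:
--         return chr(integer)
--     return convertInttoString(integer // 1000) + chr(integer % 1000)
-- ===== Notes on version B (the rewrite author's own statement) =====
-- stated objective: alternative
-- what changed: B abandons A's string pipeline (str(), zero-padding while-loop, slicing comprehensions, join) entirely: it treats the integer as a base-1000 number and recursively emits chr(integer % 1000) chunks by arithmetic divmod, so no decimal string is ever built or chunked.
import Mathlib
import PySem

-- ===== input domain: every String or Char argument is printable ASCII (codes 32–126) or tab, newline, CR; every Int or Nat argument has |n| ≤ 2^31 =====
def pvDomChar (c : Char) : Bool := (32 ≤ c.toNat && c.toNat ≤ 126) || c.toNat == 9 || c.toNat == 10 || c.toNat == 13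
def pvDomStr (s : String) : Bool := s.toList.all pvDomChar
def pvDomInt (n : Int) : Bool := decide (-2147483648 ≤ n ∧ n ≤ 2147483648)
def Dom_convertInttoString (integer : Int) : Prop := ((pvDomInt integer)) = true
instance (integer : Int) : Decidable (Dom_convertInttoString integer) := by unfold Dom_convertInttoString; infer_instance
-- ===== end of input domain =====

-- B replaces A's whole string pipeline (str(), zero-padding while-loop, slicing
-- comprehensions, join) by an arithmetic recursion over the base-1000 digits of
-- the integer itself (objective: alternative algorithm, similar cost).

-- ===== PORT A =====
-- chr(v): exact for the chunk values 0..999 reached inside Pre_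
def pyChr (v : Int) : Char := Char.ofNat v.toNat
-- int(cs): Pre_ admits only inputs on which Python's int() succeeds here, so the getD 0 default is never taken inside Pre_
def pyIntChars (cs : List Char) : Int := (PySem.Int.ofChars? cs).getD 0
-- A's while-loop prepends "0" at most twice (len % 3 cycles through 3 values); fuel 2 makes it total
def padLoop : Nat → List Char → List Char
  | 0, t => t
  | fuel+1, t => if t.length % 3 ≠ 0 then padLoop fuel ('0' :: t) else t

def convertInttoString (integer : Int) : String :=
  let tempstr := padLoop 2 (PySem.Int.toChars integer)
  let templist := (PySem.List.pyRange 0 (tempstr.length : Int) 3).map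
      (fun i => PySem.List.slice tempstr (some i) (some (i + 3)))
  let result := (PySem.List.pyRange 0 (templist.length : Int) 1).map
      (fun i => pyChr (pyIntChars (PySem.List.pyGetD templist i [])))
  String.ofList result

-- ===== PORT B =====
-- B's recursion, on the character-list side of the String convention:
-- chr(integer) for integer < 1000, else recurse on integer // 1000 and append chr(integer % 1000)
def altChars (n : Int) : List Char :=
  if n < 1000 then [Char.ofNat n.toNat]
  else altChars (PySem.Int.floordiv n 1000) ++ [Char.ofNat (PySem.Int.mod n 1000).toNat]
termination_by n.toNat
decreasing_by
  rw [PySem.Int.floordiv_eq_ediv_of_pos (by norm_num)]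
  omega

def convertInttoString_alt (integer : Int) : String := String.ofList (altChars integer)

-- ===== PRECONDITION & SPEC =====
-- A raises ValueError on every negative integer (the '-' sign ends up inside a zero-padded chunk), so Pre_ keeps the non-negatives.
def Pre_convertInttoString (integer : Int) : Prop := 0 ≤ integer
instance (integer : Int) : Decidable (Pre_convertInttoString integer) := by unfold Pre_convertInttoString; infer_instance
def pvWitness_convertInttoString : Int := 12345

def Spec_convertInttoString (integer : Int) (out : String) : Prop := out = convertInttoString_alt integer
instance (integer : Int) (out : String) : Decidable (Spec_convertInttoString integer out) := by unfold Spec_convertInttoString; infer_instance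

-- ===== CLAIM (what is proved, stated in full; the proofs are below) =====
def Claim_equal_convertInttoString : Prop := ∀ (integer : Int), Dom_convertInttoString integer → Pre_convertInttoString integer → Spec_convertInttoString integer (convertInttoString integer)

-- ===== LEMMAS AND PROOFS =====

-- Nat.toDigitsCore facts (accumulator and fuel irrelevance), base 10
theorem core_acc (fuel : ℕ) : ∀ (n : ℕ) (ds : List Char),
    Nat.toDigitsCore 10 fuel n ds = Nat.toDigitsCore 10 fuel n [] ++ ds := by
  induction fuel with
  | zero => intro n ds; simp [Nat.toDigitsCore]
  | succ f ih =>
    intro n ds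
    by_cases h : n / 10 = 0
    · simp [Nat.toDigitsCore, h]
    · simp only [Nat.toDigitsCore, h, if_false]
      rw [ih (n/10) ((n % 10).digitChar :: ds), ih (n/10) [(n % 10).digitChar]]
      simp

theorem core_fuel (n : ℕ) : ∀ (fuel fuel' : ℕ) (ds : List Char), n < fuel → n < fuel' →
    Nat.toDigitsCore 10 fuel n ds = Nat.toDigitsCore 10 fuel' n ds := by
  induction n using Nat.strong_induction_on with
  | _ n ih =>
    intro fuel fuel' ds h h'
    match fuel, fuel' with
    | f+1, f'+1 =>
      by_cases h0 : n / 10 = 0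
      · simp [Nat.toDigitsCore, h0]
      · simp only [Nat.toDigitsCore, h0, if_false]
        exact ih (n/10) (by omega) f f' _ (by omega) (by omega)

theorem toDigits_base (n : ℕ) (h : n < 10) : Nat.toDigits 10 n = [Nat.digitChar n] := by
  simp [Nat.toDigits, Nat.toDigitsCore, Nat.div_eq_of_lt h, Nat.mod_eq_of_lt h]

theorem toDigits_step (n : ℕ) (h : 10 ≤ n) :
    Nat.toDigits 10 n = Nat.toDigits 10 (n/10) ++ [Nat.digitChar (n % 10)] := by
  have h0 : n / 10 ≠ 0 := by omega
  conv_lhs => rw [Nat.toDigits]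
  rw [show Nat.toDigitsCore 10 (n+1) n [] = Nat.toDigitsCore 10 n (n/10) [(n%10).digitChar] from by
    simp [Nat.toDigitsCore, h0]]
  rw [core_acc, core_fuel (n/10) n (n/10+1) [] (by omega) (by omega)]
  rfl

-- str(n) splits off its last three digits once n ≥ 1000
theorem toDigits_step1000 (n : ℕ) (h : 1000 ≤ n) :
    Nat.toDigits 10 n = Nat.toDigits 10 (n/1000) ++
      [Nat.digitChar (n/100 % 10), Nat.digitChar (n/10 % 10), Nat.digitChar (n % 10)] := by
  rw [toDigits_step n (by omega), toDigits_step (n/10) (by omega),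
      toDigits_step (n/10/10) (by omega)]
  have e1 : n/10/10 = n/100 := by omega
  have e2 : n/10/10/10 = n/1000 := by omega
  rw [e1] at *
  rw [e2]
  simp

-- A's while-loop = prepend exactly (3*⌈L/3⌉ - L) zeros
theorem padLoop_eq (s : List Char) :
    padLoop 2 s = List.replicate (3 * ((s.length + 2) / 3) - s.length) '0' ++ s := by
  have h3 : s.length % 3 = 0 ∨ s.length % 3 = 1 ∨ s.length % 3 = 2 := by omega
  rcases h3 with h | h | h
  · have hp : 3 * ((s.length + 2) / 3) - s.length = 0 := by omega
    rw [hp]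
    simp [padLoop, h]
  · have hp : 3 * ((s.length + 2) / 3) - s.length = 2 := by omega
    rw [hp]
    simp [padLoop, h, List.length_cons, Nat.add_mod, List.replicate]
  · have hp : 3 * ((s.length + 2) / 3) - s.length = 1 := by omega
    rw [hp]
    simp [padLoop, h, List.length_cons, Nat.add_mod, List.replicate]

-- the forward 3-chunks A's comprehension builds
def chunksOf (t : List Char) : List (List Char) :=
  (List.range (t.length / 3)).map (fun k => (t.drop (3*k)).take 3)

-- [t[i:i+3] for i in range(0, len(t), 3)] on a t of length 3*c
theorem rangeStep3 (t : List Char) (c : Nat) (h : t.length = 3 * c) :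
    (PySem.List.pyRange 0 (t.length : Int) 3).map
        (fun i => PySem.List.slice t (some i) (some (i + 3)))
      = (List.range c).map (fun k => (t.drop (3*k)).take 3) := by
  rw [PySem.List.pyRange_of_pos 0 (t.length : Int) (by norm_num)]
  have hcnt : (if (0:Int) < (t.length : Int) then (((t.length : Int) - 0 + 3 - 1) / 3).toNat else 0) = c := by
    rw [h]; push_cast; split_ifs with hh <;> omega
  rw [hcnt, List.map_map]
  apply List.map_congr_left
  intro k hk
  simp only [Function.comp]
  have e1 : ((0:Int) + 3 * (k:Int)) = ((3*k : Nat) : Int) := by push_cast; ring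
  rw [e1]
  have e2 : (((3*k : Nat) : Int) + 3) = ((3*k + 3 : Nat) : Int) := by push_cast; ring
  rw [e2, PySem.List.slice_natCast]
  congr 1
  omega

-- A's result as a map over the forward 3-chunks of the padded digit string
theorem A_formula (n : Int) :
    convertInttoString n = String.ofList
      ((chunksOf (padLoop 2 (PySem.Int.toChars n))).map (fun t => pyChr (pyIntChars t))) := by
  unfold convertInttoString
  dsimp only
  set t := padLoop 2 (PySem.Int.toChars n) with ht
  set L := (PySem.Int.toChars n).length with hL
  have hlen : t.length = 3 * ((L + 2) / 3) := by
    rw [ht, padLoop_eq]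
    simp only [List.length_append, List.length_replicate, ← hL]
    omega
  rw [rangeStep3 t ((L + 2) / 3) hlen]
  rw [show (fun i => pyChr (pyIntChars (PySem.List.pyGetD
        (((List.range ((L + 2) / 3)).map (fun k => (t.drop (3*k)).take 3))) i [])))
      = (fun u => pyChr (pyIntChars u)) ∘ (fun i => PySem.List.pyGetD
        ((List.range ((L + 2) / 3)).map (fun k => (t.drop (3*k)).take 3)) i []) from rfl]
  rw [← List.map_map]
  rw [show (((List.range ((L + 2) / 3)).map (fun k => (t.drop (3*k)).take 3)).length : Int)
      = (((List.range ((L + 2) / 3)).map (fun k => (t.drop (3*k)).take 3)).length : Int) from rfl]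
  rw [PySem.List.map_pyGetD_pyRange_zero']
  rw [chunksOf, hlen]
  simp

-- int() on a 3-digit chunk
theorem ofChars3 : ∀ a b c : Fin 10,
    PySem.Int.ofChars? [Nat.digitChar a.1, Nat.digitChar b.1, Nat.digitChar c.1]
      = some ((100*a.1 + 10*b.1 + c.1 : ℕ) : ℤ) := by decide

-- A's padding turns str(r), r < 1000, into exactly the 3-digit form of r
theorem pad_small (r : ℕ) (h : r < 1000) :
    padLoop 2 (Nat.toDigits 10 r)
      = [Nat.digitChar (r/100), Nat.digitChar (r/10 % 10), Nat.digitChar (r % 10)] := by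
  by_cases h1 : r < 10
  · rw [toDigits_base r h1, padLoop_eq]
    have : (3 * (([Nat.digitChar r].length + 2) / 3) - [Nat.digitChar r].length) = 2 := by
      simp only [List.length_cons, List.length_nil]
    rw [this]
    have e1 : r / 100 = 0 := by omega
    have e2 : r / 10 % 10 = 0 := by omega
    have e3 : r % 10 = r := by omega
    rw [e1, e2, e3]
    rfl
  · by_cases h2 : r < 100
    · rw [toDigits_step r (by omega), toDigits_base (r/10) (by omega), padLoop_eq]
      have hl : ([Nat.digitChar (r/10)] ++ [Nat.digitChar (r % 10)]).length = 2 := by simp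
      rw [hl]
      have e1 : r / 100 = 0 := by omega
      have e2 : r / 10 % 10 = r / 10 := by omega
      rw [e1, e2]
      rfl
    · rw [toDigits_step r (by omega), toDigits_step (r/10) (by omega),
          toDigits_base (r/10/10) (by omega), padLoop_eq]
      have e0 : r/10/10 = r/100 := by omega
      have hl : (([Nat.digitChar (r/10/10)] ++ [Nat.digitChar (r/10 % 10)]) ++ [Nat.digitChar (r % 10)]).length = 3 := by simp
      rw [hl, e0]
      rfl

-- padding a string with a trailing full 3-chunk = pad the head, keep the chunk
theorem padLoop_append3 (u v : List Char) (hv : v.length = 3) :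
    padLoop 2 (u ++ v) = padLoop 2 u ++ v := by
  rw [padLoop_eq, padLoop_eq]
  have e : 3 * (((u ++ v).length + 2) / 3) - (u ++ v).length
      = 3 * ((u.length + 2) / 3) - u.length := by
    simp only [List.length_append, hv]; omega
  rw [e, List.append_assoc]

-- A's chunking peels the trailing 3-chunk off
theorem chunksOf_append3 (t1 v : List Char) (h1 : t1.length % 3 = 0) (hv : v.length = 3) :
    chunksOf (t1 ++ v) = chunksOf t1 ++ [v] := by
  unfold chunksOf
  have hlen : (t1 ++ v).length / 3 = t1.length / 3 + 1 := by
    simp only [List.length_append, hv]; omega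
  rw [hlen, List.range_succ, List.map_append]
  congr 1
  · apply List.map_congr_left
    intro k hk
    simp only [List.mem_range] at hk
    have h3k : 3 * k + 3 ≤ t1.length := by omega
    rw [List.drop_append_of_le_length (by omega)]
    rw [List.take_append_of_le_length (by simp; omega)]
  · simp only [List.map_cons, List.map_nil]
    rw [show (3 * (t1.length / 3)) = t1.length from by omega]
    have hd : (t1 ++ v).drop t1.length = v := by simp
    rw [hd, List.take_of_length_le (by omega)]

-- the chunk-value of the trailing 3-digit group is r (as chr's argument)
theorem chunkVal (x y z : ℕ) (hx : x < 10) (hy : y < 10) (hz : z < 10) :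
    pyChr (pyIntChars [Nat.digitChar x, Nat.digitChar y, Nat.digitChar z])
      = Char.ofNat (100*x + 10*y + z) := by
  rw [pyIntChars, ofChars3 ⟨x, hx⟩ ⟨y, hy⟩ ⟨z, hz⟩]
  simp only [Option.getD_some, pyChr]
  congr 1

-- the heart: A's chunk map = B's base-1000 recursion, by strong induction
theorem main_nat (m : ℕ) :
    (chunksOf (padLoop 2 (Nat.toDigits 10 m))).map (fun t => pyChr (pyIntChars t))
      = altChars (m : ℤ) := by
  induction m using Nat.strong_induction_on with
  | _ m ih =>
    by_cases h : m < 1000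
    · rw [pad_small m h]
      rw [altChars, if_pos (by exact_mod_cast h)]
      unfold chunksOf
      simp only [List.length_cons, List.length_nil]
      rw [show (2+1)/3 = 1 from rfl, List.range_one, List.map_cons, List.map_nil,
          List.map_cons, List.map_nil]
      simp only [Nat.mul_zero, List.drop_zero, List.take_succ_cons, List.take_zero]
      rw [chunkVal (m/100) (m/10 % 10) (m % 10) (by omega) (by omega) (by omega)]
      have : 100*(m/100) + 10*(m/10 % 10) + m % 10 = ((m:ℤ)).toNat := by omega
      rw [this]
    · rw [toDigits_step1000 m (by omega)]
      rw [padLoop_append3 _ _ (by simp)]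
      rw [chunksOf_append3 _ _ (by rw [padLoop_eq]; simp; omega) (by simp)]
      rw [List.map_append]
      rw [ih (m/1000) (by omega)]
      conv_rhs => rw [altChars]
      rw [if_neg (show ¬((m:ℤ) < 1000) from by exact_mod_cast h)]
      congr 1
      · congr 1
        rw [PySem.Int.floordiv_eq_ediv_of_pos (by norm_num)]
        rw [show ((m:ℤ)/1000) = ((m/1000 : ℕ) : ℤ) from by omega]
      · simp only [List.map_cons, List.map_nil]
        rw [chunkVal (m/100 % 10) (m/10 % 10) (m % 10) (by omega) (by omega) (by omega)]
        rw [PySem.Int.mod_eq_emod_of_pos (by norm_num)]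
        congr 2
        omega

theorem main_eq (n : Int) (hn : 0 ≤ n) : convertInttoString n = convertInttoString_alt n := by
  rw [A_formula, convertInttoString_alt]
  rw [show PySem.Int.toChars n = Nat.toDigits 10 n.toNat from by
    rw [PySem.Int.toChars, if_neg (by omega)]]
  rw [main_nat n.toNat]
  rw [show ((n.toNat : ℕ) : ℤ) = n from by omega]

-- ===== VERDICT (by name: the statement is the Claim_ definition above) =====
theorem convertInttoString_spec : Claim_equal_convertInttoString := by
  intro n _ hpre
  unfold Spec_convertInttoString
  exact main_eq n hpre
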